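-- pv_equiv track=rewrite | github.com/Filipchi/MisionTIC2022 | Ciclo l/Semana 3/RetoMinTIC_3.py | costo_telegrama
-- ===== SOURCE A (Python) =====
-- def costo_telegrama(mensajes:list)-> dict:
--     letras = 0
--     palabras = 1
--     precio = 0
--     resultado = {}
--     for i in mensajes:
--         for j in i:
--             if j == " ":
--                 if letras <= 5:
--                     precio += 100
--                 elif letras >= 5:
--                     precio += 200
--                 letras = 0
--                 palabras += 1
--             else:
--                 letras += 1
--         if letras <= 5:
--             precio += 100
--         elif letras >= 5:
--             precio += 200
--         if palabras > 7:
--             precio -= 300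
--         resultado[i] = precio
--         precio = 0
--         letras = 0
--         palabras = 1
--     return resultado
-- ===== SOURCE B (Python) =====
-- def costo_telegrama(mensajes: list) -> dict:
--     resultado = {}
--     for i in mensajes:
--         words = i.split(" ")
--         precio = 0
--         for w in words:
--             precio += 100 if len(w) <= 5 else 200
--         if len(words) > 7:
--             precio -= 300
--         resultado[i] = precio
--     return resultado
-- ===== Notes on version B (the rewrite author's own statement) =====
-- stated objective: simpler
-- what changed: Replaces A's character-by-character state machine (letras/palabras/precio counters threaded across the whole loop) by split-on-space followed by a per-word pricing pass.
import Mathlib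
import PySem

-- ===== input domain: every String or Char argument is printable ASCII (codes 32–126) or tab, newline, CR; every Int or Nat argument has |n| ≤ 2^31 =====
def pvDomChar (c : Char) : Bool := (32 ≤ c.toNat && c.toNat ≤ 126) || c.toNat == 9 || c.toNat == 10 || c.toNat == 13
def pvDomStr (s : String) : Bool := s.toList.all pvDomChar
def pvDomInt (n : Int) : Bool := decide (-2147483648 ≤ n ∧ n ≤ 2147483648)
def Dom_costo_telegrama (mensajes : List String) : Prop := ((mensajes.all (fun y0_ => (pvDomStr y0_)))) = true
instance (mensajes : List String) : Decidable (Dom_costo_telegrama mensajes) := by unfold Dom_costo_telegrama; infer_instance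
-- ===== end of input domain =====

-- B replaces A's character-by-character letter/word state machine by split-on-space then
-- per-word pricing (objective: simpler). Return values only; neither version mutates its argument.

-- ===== PORT A =====
-- inner character loop of A: state (letras, palabras, precio)
def aStep (s : Nat × Nat × Int) (j : Char) : Nat × Nat × Int :=
  let (letras, palabras, precio) := s
  if j = ' ' then
    if letras ≤ 5 then (0, palabras + 1, precio + 100)
    else if 5 ≤ letras then (0, palabras + 1, precio + 200)
    else (0, palabras + 1, precio)
  else (letras + 1, palabras, precio)

def costo_telegrama (mensajes : List String) : List (String × Int) :=
  let st := mensajes.foldl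
    (fun (st : Nat × Nat × Int × PySem.Dict String Int) i =>
      let (letras, palabras, precio, resultado) := st
      let (letras, palabras, precio) := i.toList.foldl aStep (letras, palabras, precio)
      let precio := if letras ≤ 5 then precio + 100 else if 5 ≤ letras then precio + 200 else precio
      let precio := if palabras > 7 then precio - 300 else precio
      (0, 1, 0, resultado.insert i precio))
    (0, 1, 0, PySem.Dict.empty)
  st.2.2.2.items

-- ===== PORT B =====
def costo_telegrama_alt (mensajes : List String) : List (String × Int) :=
  (mensajes.foldl
    (fun (resultado : PySem.Dict String Int) i =>
      let words := PySem.Chars.splitOn i.toList [' ']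
      let precio := words.foldl (fun acc w => acc + (if w.length ≤ 5 then (100 : Int) else 200)) 0
      let precio := if words.length > 7 then precio - 300 else precio
      resultado.insert i precio)
    PySem.Dict.empty).items

-- ===== PRECONDITION & SPEC =====
def Spec_costo_telegrama (mensajes : List String) (out : List (String × Int)) : Prop := out = costo_telegrama_alt mensajes
instance (mensajes : List String) (out : List (String × Int)) : Decidable (Spec_costo_telegrama mensajes out) := by unfold Spec_costo_telegrama; infer_instance

-- ===== CLAIM (what is proved, stated in full; the proofs are below) =====
def Claim_equal_costo_telegrama : Prop := ∀ (mensajes : List String), Dom_costo_telegrama mensajes → Spec_costo_telegrama mensajes (costo_telegrama mensajes)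

-- ===== LEMMAS AND PROOFS =====

-- price of one word of n letters
def wprice (n : Nat) : Int := if n ≤ 5 then 100 else 200

-- sum of word prices of a split, the first word carrying l letters already read
def wpriceSum (l : Nat) (ws : List (List Char)) : Int :=
  match ws with
  | [] => wprice l
  | w :: ws => wprice (l + w.length) + (ws.map (fun w => wprice w.length)).sum

lemma go_acc (sep : List Char) (fuel : Nat) : ∀ (l cur : List Char) (acc : List (List Char)),
    PySem.Chars.splitOn.go sep fuel l cur acc = acc.reverse ++ PySem.Chars.splitOn.go sep fuel l cur [] := by
  induction fuel with
  | zero => intro l cur acc; simp [PySem.Chars.splitOn.go]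
  | succ fuel ih =>
    intro l cur acc
    cases l with
    | nil => simp [PySem.Chars.splitOn.go]
    | cons c rest =>
      simp only [PySem.Chars.splitOn.go]
      split
      · rw [ih _ _ (cur.reverse :: acc), ih _ _ [cur.reverse]]
        simp
      · exact ih _ _ _

lemma go_cur (fuel : Nat) : ∀ (l cur : List Char),
    PySem.Chars.splitOn.go [' '] fuel l cur [] =
      (PySem.Chars.splitOn.go [' '] fuel l [] []).modifyHead (fun w => cur.reverse ++ w) := by
  induction fuel with
  | zero => intro l cur; simp [PySem.Chars.splitOn.go]
  | succ fuel ih =>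
    intro l cur
    cases l with
    | nil => simp [PySem.Chars.splitOn.go]
    | cons c rest =>
      simp only [PySem.Chars.splitOn.go]
      split
      · rw [go_acc _ _ _ _ [cur.reverse], go_acc _ _ _ _ [List.reverse []]]
        rcases h : PySem.Chars.splitOn.go [' '] fuel (List.drop [' '].length (c :: rest)) [] [] with _ | ⟨w, ws⟩ <;> simp
      · rw [ih rest (c :: cur), ih rest [c]]
        rcases h : PySem.Chars.splitOn.go [' '] fuel rest [] [] with _ | ⟨w, ws⟩ <;> simp

lemma go_ne_nil (sep : List Char) (fuel : Nat) : ∀ (l cur : List Char) (acc : List (List Char)),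
    PySem.Chars.splitOn.go sep fuel l cur acc ≠ [] := by
  induction fuel with
  | zero => intro l cur acc; simp [PySem.Chars.splitOn.go]
  | succ fuel ih =>
    intro l cur acc
    cases l with
    | nil => simp [PySem.Chars.splitOn.go]
    | cons c rest =>
      simp only [PySem.Chars.splitOn.go]
      split
      · exact ih _ _ _
      · exact ih _ _ _

lemma splitOn_space_ne_nil (cs : List Char) : PySem.Chars.splitOn cs [' '] ≠ [] :=
  go_ne_nil _ _ _ _ _

lemma splitOn_space_nil : PySem.Chars.splitOn [] [' '] = [[]] := rfl

lemma splitOn_space_cons_space (cs : List Char) :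
    PySem.Chars.splitOn (' ' :: cs) [' '] = [] :: PySem.Chars.splitOn cs [' '] := by
  show PySem.Chars.splitOn.go [' '] (cs.length + 1 + 1) (' ' :: cs) [] [] = _
  simp only [PySem.Chars.splitOn.go, List.isPrefixOf, beq_self_eq_true, Bool.true_and,
    if_true, List.reverse_nil]
  rw [go_acc]
  rfl

lemma splitOn_space_cons_ne (c : Char) (cs : List Char) (h : c ≠ ' ') :
    PySem.Chars.splitOn (c :: cs) [' '] = (PySem.Chars.splitOn cs [' ']).modifyHead (fun w => c :: w) := by
  show PySem.Chars.splitOn.go [' '] (cs.length + 1 + 1) (c :: cs) [] [] = _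
  have hb : ([' '].isPrefixOf (c :: cs)) = false := by
    simp [List.isPrefixOf]; exact fun hc => absurd hc.symm h
  simp only [PySem.Chars.splitOn.go, hb, if_neg, Bool.false_eq_true, not_false_iff]
  rw [go_cur]
  rfl

lemma splitOn_space_length (cs : List Char) :
    (PySem.Chars.splitOn cs [' ']).length = cs.count ' ' + 1 := by
  induction cs with
  | nil => rfl
  | cons c cs ih =>
    by_cases h : c = ' '
    · subst h; rw [splitOn_space_cons_space]; simp [ih]
    · rw [splitOn_space_cons_ne c cs h]
      simp [ih, h]

-- A's end-of-word branch is exactly wprice (letras is a Nat, so the dead third branch never fires)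
lemma aPrice_eq (letras : Nat) (precio : Int) :
    (if letras ≤ 5 then precio + 100 else if 5 ≤ letras then precio + 200 else precio)
      = precio + wprice letras := by
  unfold wprice; split_ifs <;> omega

-- the inner character loop: final precio (after the trailing word is charged) is the
-- split-based word-price sum, and palabras counts the spaces
lemma inner_spec (cs : List Char) : ∀ (l p : Nat) (pr : Int),
    (let r := cs.foldl aStep (l, p, pr)
     (if r.1 ≤ 5 then r.2.2 + 100 else if 5 ≤ r.1 then r.2.2 + 200 else r.2.2)
        = pr + wpriceSum l (PySem.Chars.splitOn cs [' '])
      ∧ r.2.1 = p + cs.count ' ') := by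
  induction cs with
  | nil =>
    intro l p pr
    constructor
    · rw [aPrice_eq, splitOn_space_nil]
      simp [wpriceSum]
    · rfl
  | cons c cs ih =>
    intro l p pr
    by_cases h : c = ' '
    · subst h
      have hstep : aStep (l, p, pr) ' ' = (0, p + 1, pr + wprice l) := by
        simp only [aStep]
        rw [← aPrice_eq l pr]
        split_ifs <;> rfl
      rw [List.foldl_cons, hstep, splitOn_space_cons_space]
      obtain ⟨h1, h2⟩ := ih 0 (p + 1) (pr + wprice l)
      refine ⟨?_, by simpa [List.count_cons, Nat.add_assoc, Nat.add_comm 1] using h2⟩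
      rw [h1]
      rcases hws : PySem.Chars.splitOn cs [' '] with _ | ⟨w, ws⟩
      · exact absurd hws (splitOn_space_ne_nil cs)
      · simp [wpriceSum]; ring
    · have hstep : aStep (l, p, pr) c = (l + 1, p, pr) := by
        simp [aStep, h]
      rw [List.foldl_cons, hstep, splitOn_space_cons_ne c cs h]
      obtain ⟨h1, h2⟩ := ih (l + 1) p pr
      refine ⟨?_, by simpa [List.count_cons, h] using h2⟩
      rw [h1]
      rcases hws : PySem.Chars.splitOn cs [' '] with _ | ⟨w, ws⟩
      · exact absurd hws (splitOn_space_ne_nil cs)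
      · simp only [List.modifyHead, wpriceSum, List.length_cons]
        have h3 : l + 1 + w.length = l + (w.length + 1) := by omega
        rw [h3]

-- per-message price: A's computation from the reset state equals B's word-based price
lemma msg_price_eq (i : String) :
    (let r := i.toList.foldl aStep (0, 1, 0)
     let precio := if r.1 ≤ 5 then r.2.2 + 100 else if 5 ≤ r.1 then r.2.2 + 200 else r.2.2
     if r.2.1 > 7 then precio - 300 else precio)
      = (let words := PySem.Chars.splitOn i.toList [' ']
         let precio := words.foldl (fun acc w => acc + (if w.length ≤ 5 then (100 : Int) else 200)) 0
         if words.length > 7 then precio - 300 else precio) := by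
  obtain ⟨h1, h2⟩ := inner_spec i.toList 0 1 0
  simp only at h1 h2 ⊢
  rw [h1, h2]
  rw [PySem.List.foldl_add _ (fun (w : List Char) => if w.length ≤ 5 then (100 : Int) else 200) 0]
  have hsum : wpriceSum 0 (PySem.Chars.splitOn i.toList [' '])
      = ((PySem.Chars.splitOn i.toList [' ']).map
          (fun w => if w.length ≤ 5 then (100 : Int) else 200)).sum := by
    rcases hws : PySem.Chars.splitOn i.toList [' '] with _ | ⟨w, ws⟩
    · exact absurd hws (splitOn_space_ne_nil i.toList)
    · simp [wpriceSum, wprice]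
  rw [hsum, splitOn_space_length]
  simp [Nat.add_comm]

-- the outer loop: A's carried (letras, palabras, precio) is always reset to (0, 1, 0),
-- so both folds build the same dictionary
lemma outer_eq (mensajes : List String) : ∀ (d : PySem.Dict String Int),
    mensajes.foldl
      (fun (st : Nat × Nat × Int × PySem.Dict String Int) i =>
        let (letras, palabras, precio, resultado) := st
        let (letras, palabras, precio) := i.toList.foldl aStep (letras, palabras, precio)
        let precio := if letras ≤ 5 then precio + 100 else if 5 ≤ letras then precio + 200 else precio
        let precio := if palabras > 7 then precio - 300 else precio
        (0, 1, 0, resultado.insert i precio)) (0, 1, 0, d)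
    = (0, 1, 0, mensajes.foldl
        (fun (resultado : PySem.Dict String Int) i =>
          let words := PySem.Chars.splitOn i.toList [' ']
          let precio := words.foldl (fun acc w => acc + (if w.length ≤ 5 then (100 : Int) else 200)) 0
          let precio := if words.length > 7 then precio - 300 else precio
          resultado.insert i precio) d) := by
  induction mensajes with
  | nil => intro d; rfl
  | cons i ms ih =>
    intro d
    rw [List.foldl_cons, List.foldl_cons]
    have := msg_price_eq i
    simp only at this ⊢
    rw [this]
    exact ih _

-- ===== VERDICT (by name: the statement is the Claim_ definition above) =====
theorem costo_telegrama_spec : Claim_equal_costo_telegrama := by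
  intro mensajes _
  show costo_telegrama mensajes = costo_telegrama_alt mensajes
  unfold costo_telegrama costo_telegrama_alt
  rw [outer_eq]
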